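-- pv_equiv track=rewrite | github.com/HardlySoftly/FAF-AI-Autorun | _autorun/install.py | modify_init
-- ===== SOURCE A (Python) =====
-- def modify_init(init_file, zip_name):
--     """
--     Copy the contents of an existing init file modifying it to make it load our
--     zip file.
--
--     :param init_file: Iterator over the lines of the file
--     :param zip_name: Name of the file we want to load
--
--     :return: A generator that yeilds the modified contents
--     """
--     # Use a simple state machine to keep track of where we are in the file
--     state = "top"
--     for line in init_file:
--         line = line.rstrip()
--         if state == "top":
--             # First search for the whitelist section
--             if line.startswith("whitelist"):
--                 state = "whitelist"
--                 # Allow the brace to be on the same line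
--                 if "{" in line:
--                     state = "whitelist_brace"
--         elif state == "whitelist":
--             # Find the opening brace
--             if "{" in line:
--                 state = "whitelist_brace"
--         elif state == "whitelist_brace":
--             # Add our line to the end
--             yield f'    "{zip_name}",\n'
--             state = "functions"
--         elif state == "functions":
--             # Find the mount sounds section
--             if line.startswith("mount_mod_sounds"):
--                 # Insert our mount before mount_mod_sounds
--                 yield (
--                     "mount_dir_with_whitelist("
--                     # Using a raw string so the backslashes are not escaped
--                     r"InitFileDir .. '\\..\\gamedata\\', '*.zip', '/')"
--                     "\n"
--                 )
--                 state = "done"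
--
--         yield line + "\n"
-- ===== SOURCE B (Python) =====
-- def modify_init(init_file, zip_name):
--     """Same transformation, done as sequential phases over one shared iterator
--     instead of a single stateful loop."""
--     it = iter(init_file)
--     # Phase 1: copy lines until one starting with 'whitelist'
--     brace = False
--     for raw in it:
--         line = raw.rstrip()
--         yield line + "\n"
--         if line.startswith("whitelist"):
--             brace = "{" in line
--             break
--     else:
--         return
--     # Phase 2: copy lines until one containing '{' (unless brace already seen)
--     if not brace:
--         for raw in it:
--             line = raw.rstrip()
--             yield line + "\n"
--             if "{" in line:
--                 break
--         else:
--             return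
--     # Phase 3: insert the zip entry before the next line
--     for raw in it:
--         yield f'    "{zip_name}",\n'
--         yield raw.rstrip() + "\n"
--         break
--     else:
--         return
--     # Phase 4: copy lines, inserting the mount before 'mount_mod_sounds'
--     for raw in it:
--         line = raw.rstrip()
--         if line.startswith("mount_mod_sounds"):
--             yield (
--                 "mount_dir_with_whitelist("
--                 r"InitFileDir .. '\\..\\gamedata\\', '*.zip', '/')"
--                 "\n"
--             )
--             yield line + "\n"
--             break
--         yield line + "\n"
--     else:
--         return
--     # Phase 5: drain the rest
--     for raw in it:
--         yield raw.rstrip() + "\n"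
-- ===== Notes on version B (the rewrite author's own statement) =====
-- stated objective: alternative
-- what changed: A's single loop with a string-valued state variable is replaced by sequential phases consuming a shared iterator: copy until 'whitelist', copy until '{', emit the zip insertion, copy until 'mount_mod_sounds' emitting the mount insertion, then drain.
import Mathlib
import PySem

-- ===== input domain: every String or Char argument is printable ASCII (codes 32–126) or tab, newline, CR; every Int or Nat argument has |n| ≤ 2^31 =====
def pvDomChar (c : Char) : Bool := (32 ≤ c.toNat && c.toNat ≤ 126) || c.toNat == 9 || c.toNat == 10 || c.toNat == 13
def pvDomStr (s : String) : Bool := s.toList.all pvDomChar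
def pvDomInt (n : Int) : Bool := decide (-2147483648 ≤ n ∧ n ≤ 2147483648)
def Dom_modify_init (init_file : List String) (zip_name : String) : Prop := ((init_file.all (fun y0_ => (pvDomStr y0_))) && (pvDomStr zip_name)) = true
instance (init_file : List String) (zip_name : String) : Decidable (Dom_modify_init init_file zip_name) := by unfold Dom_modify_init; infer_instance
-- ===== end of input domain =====

-- B rewrites A's single stateful loop as sequential phases over the remaining lines (alternative decomposition; same cost).

-- ===== PORT A =====
-- A's state machine: the string-valued `state` variable becomes an enum.
inductive MiState : Type
  | top | whitelist | whitelistBrace | functions | done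
deriving DecidableEq, Repr

-- the two inserted lines
def miZipLine (zip_name : String) : String := "    \"" ++ zip_name ++ "\",\n"
def miMountLine : String := "mount_dir_with_whitelist(InitFileDir .. '\\\\..\\\\gamedata\\\\', '*.zip', '/')\n"

-- literal transliteration of A's loop: one step per line, carrying `state`
def modify_init_go (zip_name : String) : List String → MiState → List String
  | [], _ => []
  | raw :: rest, st =>
    let line := PySem.Str.rstrip raw
    match st with
    | .top =>
      let st' := if PySem.Str.startswith line "whitelist" then
                   (if PySem.Str.isIn "{" line then MiState.whitelistBrace else MiState.whitelist)
                 else MiState.top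
      (line ++ "\n") :: modify_init_go zip_name rest st'
    | .whitelist =>
      let st' := if PySem.Str.isIn "{" line then MiState.whitelistBrace else MiState.whitelist
      (line ++ "\n") :: modify_init_go zip_name rest st'
    | .whitelistBrace =>
      miZipLine zip_name :: (line ++ "\n") :: modify_init_go zip_name rest MiState.functions
    | .functions =>
      if PySem.Str.startswith line "mount_mod_sounds" then
        miMountLine :: (line ++ "\n") :: modify_init_go zip_name rest MiState.done
      else
        (line ++ "\n") :: modify_init_go zip_name rest MiState.functions
    | .done =>
      (line ++ "\n") :: modify_init_go zip_name rest MiState.done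

def modify_init (init_file : List String) (zip_name : String) : List String :=
  modify_init_go zip_name init_file MiState.top

-- ===== PORT B =====
-- Phase 5: drain the rest
def miPhase5 : List String → List String
  | [] => []
  | raw :: rest => (PySem.Str.rstrip raw ++ "\n") :: miPhase5 rest

-- Phase 4: copy lines, inserting the mount before 'mount_mod_sounds'
def miPhase4 : List String → List String
  | [] => []
  | raw :: rest =>
    let line := PySem.Str.rstrip raw
    if PySem.Str.startswith line "mount_mod_sounds" then
      miMountLine :: (line ++ "\n") :: miPhase5 rest
    else
      (line ++ "\n") :: miPhase4 rest

-- Phase 3: insert the zip entry before the next line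
def miPhase3 (zip_name : String) : List String → List String
  | [] => []
  | raw :: rest => miZipLine zip_name :: (PySem.Str.rstrip raw ++ "\n") :: miPhase4 rest

-- Phase 2: copy lines until one containing '{'
def miPhase2 (zip_name : String) : List String → List String
  | [] => []
  | raw :: rest =>
    let line := PySem.Str.rstrip raw
    (line ++ "\n") ::
      (if PySem.Str.isIn "{" line then miPhase3 zip_name rest else miPhase2 zip_name rest)

-- Phase 1: copy lines until one starting with 'whitelist'
def miPhase1 (zip_name : String) : List String → List String
  | [] => []
  | raw :: rest =>
    let line := PySem.Str.rstrip raw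
    (line ++ "\n") ::
      (if PySem.Str.startswith line "whitelist" then
         (if PySem.Str.isIn "{" line then miPhase3 zip_name rest else miPhase2 zip_name rest)
       else miPhase1 zip_name rest)

def modify_init_alt (init_file : List String) (zip_name : String) : List String :=
  miPhase1 zip_name init_file

-- ===== PRECONDITION & SPEC =====
def Spec_modify_init (init_file : List String) (zip_name : String) (out : List String) : Prop := out = modify_init_alt init_file zip_name
instance (init_file : List String) (zip_name : String) (out : List String) : Decidable (Spec_modify_init init_file zip_name out) := by unfold Spec_modify_init; infer_instance

-- ===== CLAIM (what is proved, stated in full; the proofs are below) =====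
def Claim_equal_modify_init : Prop := ∀ (init_file : List String) (zip_name : String), Dom_modify_init init_file zip_name → Spec_modify_init init_file zip_name (modify_init init_file zip_name)

-- ===== LEMMAS AND PROOFS =====
-- which phase of B corresponds to which state of A
def miPhaseOf (zip_name : String) : MiState → List String → List String
  | .top => miPhase1 zip_name
  | .whitelist => miPhase2 zip_name
  | .whitelistBrace => miPhase3 zip_name
  | .functions => miPhase4
  | .done => miPhase5

theorem modify_init_go_eq_phase (zip_name : String) (l : List String) :
    ∀ st : MiState, modify_init_go zip_name l st = miPhaseOf zip_name st l := by
  induction l with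
  | nil => intro st; cases st <;> rfl
  | cons raw rest ih =>
    intro st
    cases st <;>
      simp only [modify_init_go, miPhaseOf, miPhase1, miPhase2, miPhase3, miPhase4, miPhase5] <;>
      (try split_ifs) <;>
      simp [ih MiState.top, ih MiState.whitelist, ih MiState.whitelistBrace,
        ih MiState.functions, ih MiState.done, miPhaseOf] <;>
      (try (cases rest <;> rfl))

-- ===== VERDICT (by name: the statement is the Claim_ definition above) =====
theorem modify_init_spec : Claim_equal_modify_init := by
  intro init_file zip_name _
  unfold Spec_modify_init modify_init modify_init_alt
  exact modify_init_go_eq_phase zip_name init_file MiState.top
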